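-- pv_equiv track=rewrite | github.com/pest88-spec/keyhunt-Ecc | dev-support/audit/stage2_static_audit.py | extract_body_excerpt
-- ===== SOURCE A (Python) =====
-- from typing import Dict, Iterable, Iterator, List, Optional, Sequence, Set, Tuple
--
-- def extract_body_excerpt(original: str, body_start: int, body_end: int, max_lines: int = 6) -> str:
--     segment = original[body_start:body_end]
--     if not segment.strip():
--         return segment.strip()
--     lines = [line.rstrip() for line in segment.splitlines()]
--     excerpt: List[str] = []
--     non_empty = 0
--     for line in lines:
--         excerpt.append(line)
--         if line.strip():
--             non_empty += 1
--         if non_empty >= max_lines: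
--             break
--     return "\n".join(excerpt).strip()
-- ===== SOURCE B (Python) =====
-- def extract_body_excerpt(original: str, body_start: int, body_end: int, max_lines: int = 6) -> str:
--     segment = original[body_start:body_end]
--     if not segment.strip():
--         return segment.strip()
--     lines = [line.rstrip() for line in segment.splitlines()]
--     idx = [i for i, line in enumerate(lines) if line.strip()]
--     cutoff = idx[max_lines - 1] + 1 if len(idx) >= max_lines else len(lines)
--     return "\n".join(lines[:cutoff]).strip()
-- ===== Notes on version B (the rewrite author's own statement) =====
-- stated objective: alternative
-- what changed: Replaces A's accumulate-and-break loop over the lines by indexing the non-empty lines once and slicing the line list at the computed cutoff position.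
-- outside the precondition, e.g. on extract_body_excerpt('a\nb\nc', 0, 5, 0): A returns 'a', B returns 'a\nb\nc'; on extract_body_excerpt('a\nb', 0, 3, -3): A returns 'a', B raises IndexError
import Mathlib
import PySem

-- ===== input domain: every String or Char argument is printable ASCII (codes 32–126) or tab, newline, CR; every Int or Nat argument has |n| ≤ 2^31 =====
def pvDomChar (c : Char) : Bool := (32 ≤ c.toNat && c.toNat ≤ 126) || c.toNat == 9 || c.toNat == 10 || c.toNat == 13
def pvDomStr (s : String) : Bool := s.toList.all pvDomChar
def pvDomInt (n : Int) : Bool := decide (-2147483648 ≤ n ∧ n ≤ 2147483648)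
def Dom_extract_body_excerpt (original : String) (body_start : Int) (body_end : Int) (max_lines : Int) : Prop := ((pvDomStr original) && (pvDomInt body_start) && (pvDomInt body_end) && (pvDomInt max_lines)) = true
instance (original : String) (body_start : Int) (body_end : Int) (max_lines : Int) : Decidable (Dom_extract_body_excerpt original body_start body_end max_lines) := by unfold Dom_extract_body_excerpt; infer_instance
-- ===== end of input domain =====

-- B indexes the non-empty lines once and slices the line list at a computed cutoff instead of A's accumulate-and-break loop; same cost, different decomposition.

-- ===== PORT A =====
-- A's for-loop with its break: append each line, count non-empty ones, stop once the count reaches max_lines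
def pvLoopA (ml : Int) : List String → Int → List String
  | [], _ => []
  | l :: rest, n =>
    let n' := if PySem.Str.strip l ≠ "" then n + 1 else n
    if ml ≤ n' then [l] else l :: pvLoopA ml rest n'

def extract_body_excerpt (original : String) (body_start : Int) (body_end : Int) (max_lines : Int) : String :=
  let segment := PySem.Str.slice original (some body_start) (some body_end)
  if PySem.Str.strip segment = "" then PySem.Str.strip segment
  else
    let lines := (PySem.Str.splitlines segment).map PySem.Str.rstrip
    PySem.Str.strip (PySem.Str.join "\n" (pvLoopA max_lines lines 0))

-- ===== PORT B =====
-- B's comprehension [i for i, line in enumerate(lines) if line.strip()]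
def pvIdxB (lines : List String) (s : Int) : List Int :=
  ((PySem.List.enumerate lines s).filter (fun p => PySem.Str.strip p.2 != "")).map Prod.fst

def extract_body_excerpt_alt (original : String) (body_start : Int) (body_end : Int) (max_lines : Int) : String :=
  let segment := PySem.Str.slice original (some body_start) (some body_end)
  if PySem.Str.strip segment = "" then PySem.Str.strip segment
  else
    let lines := (PySem.Str.splitlines segment).map PySem.Str.rstrip
    let idx := pvIdxB lines 0
    let cutoff : Int :=
      if (idx.length : Int) ≥ max_lines then (PySem.List.pyGet? idx (max_lines - 1)).getD 0 + 1
      else (lines.length : Int)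
    PySem.Str.strip (PySem.Str.join "\n" (PySem.List.slice lines none (some cutoff)))

-- ===== PRECONDITION & SPEC =====
-- Pre_ excludes max_lines ≤ 0, a degenerate request for "at most zero non-empty lines" that no caller would specify:
-- there A's value (only the first line, an accident of where its loop breaks) and B's behaviour (the whole segment, or
-- an IndexError from Python's negative indexing) are equally arbitrary.
def Pre_extract_body_excerpt (original : String) (body_start : Int) (body_end : Int) (max_lines : Int) : Prop := 1 ≤ max_lines
instance (original : String) (body_start : Int) (body_end : Int) (max_lines : Int) : Decidable (Pre_extract_body_excerpt original body_start body_end max_lines) := by unfold Pre_extract_body_excerpt; infer_instance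

def pvWitness_extract_body_excerpt : String × Int × Int × Int := ("a\nb\nc", 0, 5, 2)

def Spec_extract_body_excerpt (original : String) (body_start : Int) (body_end : Int) (max_lines : Int) (out : String) : Prop := out = extract_body_excerpt_alt original body_start body_end max_lines
instance (original : String) (body_start : Int) (body_end : Int) (max_lines : Int) (out : String) : Decidable (Spec_extract_body_excerpt original body_start body_end max_lines out) := by unfold Spec_extract_body_excerpt; infer_instance

-- ===== CLAIM (what is proved, stated in full; the proofs are below) =====
def Claim_equal_extract_body_excerpt : Prop := ∀ (original : String) (body_start : Int) (body_end : Int) (max_lines : Int), Dom_extract_body_excerpt original body_start body_end max_lines → Pre_extract_body_excerpt original body_start body_end max_lines → Spec_extract_body_excerpt original body_start body_end max_lines (extract_body_excerpt original body_start body_end max_lines)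

-- ===== LEMMAS AND PROOFS =====

-- the cutoff as a recursion: number of lines kept when k more non-empty lines are wanted
def pvF : List String → Int → Nat
  | [], _ => 0
  | l :: rest, k =>
    if PySem.Str.strip l ≠ "" ∧ k ≤ 1 then 1
    else pvF rest (if PySem.Str.strip l ≠ "" then k - 1 else k) + 1

theorem pvLoopA_eq_take (lines : List String) : ∀ (ml n : Int), n < ml →
    pvLoopA ml lines n = lines.take (pvF lines (ml - n)) := by
  induction lines with
  | nil => intro ml n _; simp [pvLoopA, pvF]
  | cons l rest ih =>
    intro ml n hn
    by_cases hl : PySem.Str.strip l = ""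
    · have hbr : ¬ ml ≤ n := by omega
      simp [pvLoopA, pvF, hl, hbr, ih ml n hn, List.take_succ_cons]
    · by_cases hbr : ml ≤ n + 1
      · have : ml - n ≤ 1 := by omega
        simp [pvLoopA, pvF, hl, hbr, this]
      · have h1 : ¬ (PySem.Str.strip l ≠ "" ∧ ml - n ≤ 1) := by
          intro h; omega
        simp only [pvLoopA, pvF, if_pos (by simp [hl] : PySem.Str.strip l ≠ ""), if_neg hbr, h1, if_false]
        rw [ih ml (n + 1) (by omega), List.take_succ_cons]
        have h2 : ml - (n + 1) = ml - n - 1 := by omega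
        rw [h2]

theorem pvIdxB_cons (l : String) (rest : List String) (s : Int) :
    pvIdxB (l :: rest) s =
      if PySem.Str.strip l ≠ "" then s :: pvIdxB rest (s + 1) else pvIdxB rest (s + 1) := by
  by_cases hl : PySem.Str.strip l = "" <;>
    simp [pvIdxB, PySem.List.enumerate_cons, hl]

theorem pvCutoff_eq (lines : List String) : ∀ (s k : Int), 1 ≤ k →
    (if ((pvIdxB lines s).length : Int) ≥ k then
        (PySem.List.pyGet? (pvIdxB lines s) (k - 1)).getD 0 + 1
      else s + (lines.length : Int)) = s + (pvF lines k : Int) := by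
  induction lines with
  | nil =>
    intro s k hk
    have : ¬ (((pvIdxB ([] : List String) s).length : Int) ≥ k) := by
      simp [pvIdxB, PySem.List.enumerate]; omega
    rw [if_neg this]
    simp [pvF]
  | cons l rest ih =>
    intro s k hk
    by_cases hl : PySem.Str.strip l = ""
    · rw [pvIdxB_cons]
      simp only [hl, ne_eq, not_true_eq_false, if_false]
      have hF : pvF (l :: rest) k = pvF rest k + 1 := by
        simp [pvF, hl]
      rw [hF]
      have := ih (s + 1) k hk
      have hlen : (s : Int) + ((l :: rest).length : Int) = (s + 1) + (rest.length : Int) := by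
        simp; omega
      rw [hlen, this]
      push_cast; ring
    · rw [pvIdxB_cons]
      simp only [hl, ne_eq, not_false_eq_true, if_true]
      by_cases hk1 : k ≤ 1
      · have hk1' : k = 1 := by omega
        subst hk1'
        have hge : ((s :: pvIdxB rest (s + 1)).length : Int) ≥ 1 := by
          simp
        have hF : pvF (l :: rest) 1 = 1 := by simp [pvF, hl]
        rw [if_pos hge]
        have h0 : PySem.List.pyGet? (s :: pvIdxB rest (s + 1)) (1 - 1) = some s := by
          norm_num
        rw [h0, hF]
        simp
      · -- k ≥ 2
        have hF : pvF (l :: rest) k = pvF rest (k - 1) + 1 := by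
          simp only [pvF, ne_eq, hl, not_false_eq_true, true_and, if_neg hk1, if_true]
        rw [hF]
        have ihr := ih (s + 1) (k - 1) (by omega)
        have e3 : k - 1 - 1 = k - 2 := by omega
        rw [e3] at ihr
        have hlen : ((s :: pvIdxB rest (s + 1)).length : Int) = ((pvIdxB rest (s + 1)).length : Int) + 1 := by
          simp
        have hget : PySem.List.pyGet? (s :: pvIdxB rest (s + 1)) (k - 1)
            = PySem.List.pyGet? (pvIdxB rest (s + 1)) (k - 2) := by
          have e1 : k - 1 = (((k - 2).toNat + 1 : Nat) : Int) := by omega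
          have e2 : k - 2 = (((k - 2).toNat : Nat) : Int) := by omega
          calc PySem.List.pyGet? (s :: pvIdxB rest (s + 1)) (k - 1)
              = (s :: pvIdxB rest (s + 1))[(k - 2).toNat + 1]? := by
                rw [e1, PySem.List.pyGet?_natCast]
            _ = (pvIdxB rest (s + 1))[(k - 2).toNat]? := by simp
            _ = PySem.List.pyGet? (pvIdxB rest (s + 1)) (k - 2) := by
                rw [e2, PySem.List.pyGet?_natCast, Int.toNat_natCast]
        by_cases hge : ((pvIdxB rest (s + 1)).length : Int) ≥ k - 1
        · have hge' : ((s :: pvIdxB rest (s + 1)).length : Int) ≥ k := by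
            rw [hlen]; omega
          rw [if_pos hge', hget, if_pos hge] at *
          rw [ihr]
          push_cast; ring
        · have hge' : ¬ ((s :: pvIdxB rest (s + 1)).length : Int) ≥ k := by
            rw [hlen]; omega
          rw [if_neg hge', if_neg hge] at *
          have h6 : (s : Int) + ((l :: rest).length : Int) = (s + 1) + (rest.length : Int) := by
            simp; omega
          rw [h6, ihr]
          push_cast; ring

-- ===== VERDICT (by name: the statement is the Claim_ definition above) =====
theorem extract_body_excerpt_spec : Claim_equal_extract_body_excerpt := by
  intro original body_start body_end max_lines _ hpre
  unfold Spec_extract_body_excerpt extract_body_excerpt extract_body_excerpt_alt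
  simp only []
  by_cases hseg : PySem.Str.strip (PySem.Str.slice original (some body_start) (some body_end)) = ""
  · simp [hseg]
  · simp only [hseg, if_false]
    set lines := (PySem.Str.splitlines (PySem.Str.slice original (some body_start) (some body_end))).map PySem.Str.rstrip with hlines
    have hA : pvLoopA max_lines lines 0 = lines.take (pvF lines max_lines) := by
      have := pvLoopA_eq_take lines max_lines 0 (by exact hpre)
      simpa using this
    have hB := pvCutoff_eq lines 0 max_lines hpre
    simp only [zero_add] at hB
    rw [hA, hB]
    have hnn : (0 : Int) ≤ (pvF lines max_lines : Int) := by positivity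
    rw [PySem.List.slice_to lines hnn]
    simp
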